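-- pv_equiv track=rewrite | github.com/pixelking20/ASTEC-examples | useful_functions.py | get_life_span
-- ===== SOURCE A (Python) =====
-- def get_life_span(couple, lin_tree):
--     """ Computes the lifespan of a couple of cells
--         Args:
--             couple(list): list of two cells (usually symetrical cells but not necessary)
--         Returns:
--             ((int), (int)): the lenght of the lifespan of the couple of cells
--     """
--     c1 = [couple[0]]
--     c2 = [couple[1]]
--     while len(lin_tree.get(c1[-1], []))==1 or len(lin_tree.get(c2[-1], []))==1:
--         if len(lin_tree.get(c1[-1], []))==1:
--             c1.append(lin_tree[c1[-1]][0])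
--         if len(lin_tree.get(c2[-1], []))==1:
--             c2.append(lin_tree[c2[-1]][0])
--     return [len(c1), len(c2)]
-- ===== SOURCE B (Python) =====
-- def get_life_span(couple, lin_tree):
--     """Bottom-up dynamic programming: in an ASTEC lineage a cell's single
--     successor always has a larger id, so processing cells in decreasing id
--     order lets each chain length be computed as 1 + the already-known length
--     of its successor; the two answers are then plain table lookups."""
--     span = {}
--     for cell in sorted(lin_tree, reverse=True):
--         children = lin_tree[cell]
--         span[cell] = 1 + span.get(children[0], 1) if len(children) == 1 else 1
--     return [span.get(couple[0], 1), span.get(couple[1], 1)]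
-- ===== Notes on version B (the rewrite author's own statement) =====
-- stated objective: alternative
-- what changed: Replaces A's interleaved chain-walking loop (growing two history lists and re-reading their last element) by a bottom-up dynamic program: the cells are sorted by decreasing id and each cell's chain length is computed once as 1 + the already-computed length of its successor; the answers are two table lookups.
-- outside the precondition, e.g. on get_life_span([1], {}): A raises IndexError, B raises IndexError; on get_life_span([3, 5], {3: [2], 2: [1]}): A returns [3, 1], B returns [2, 1]
import Mathlib
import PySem

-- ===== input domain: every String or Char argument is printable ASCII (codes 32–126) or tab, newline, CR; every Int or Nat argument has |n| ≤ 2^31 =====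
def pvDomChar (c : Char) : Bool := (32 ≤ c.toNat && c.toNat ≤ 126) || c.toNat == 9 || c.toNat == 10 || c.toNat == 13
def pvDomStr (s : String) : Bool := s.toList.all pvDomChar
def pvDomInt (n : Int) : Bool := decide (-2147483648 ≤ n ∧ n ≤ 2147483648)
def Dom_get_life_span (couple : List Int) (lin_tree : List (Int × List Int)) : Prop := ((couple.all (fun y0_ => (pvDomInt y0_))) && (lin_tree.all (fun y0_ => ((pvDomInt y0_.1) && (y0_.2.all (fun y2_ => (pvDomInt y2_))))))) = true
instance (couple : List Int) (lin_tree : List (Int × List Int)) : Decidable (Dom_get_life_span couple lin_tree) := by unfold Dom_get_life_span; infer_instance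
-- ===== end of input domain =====

-- B replaces A's interleaved chain-walking loop by a bottom-up dynamic program over the
-- cells sorted by decreasing id (in an ASTEC lineage a single successor has a larger id);
-- the two answers become table lookups. Return values agree on all of Pre_.

-- ===== PORT A =====
-- lin_tree.get(k, [])  (dict lookup with default)
def pvGetLS (lin_tree : List (Int × List Int)) (k : Int) : List Int :=
  ((PySem.Dict.mk lin_tree).get? k).getD []

-- the 'while' loop of A, on the state (c1, c2); fuel is a totalization guard only,
-- never reached under Pre_get_life_span
def pvLoopA (lin_tree : List (Int × List Int)) : Nat → List Int → List Int → List Int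
  | 0, c1, c2 => [(c1.length : Int), (c2.length : Int)]
  | f + 1, c1, c2 =>
    let l1 := (PySem.List.pyGet? c1 (-1)).getD 0
    let l2 := (PySem.List.pyGet? c2 (-1)).getD 0
    if (pvGetLS lin_tree l1).length = 1 ∨ (pvGetLS lin_tree l2).length = 1 then
      pvLoopA lin_tree f
        (if (pvGetLS lin_tree l1).length = 1 then
           c1 ++ [(PySem.List.pyGet? (pvGetLS lin_tree l1) 0).getD 0] else c1)
        (if (pvGetLS lin_tree l2).length = 1 then
           c2 ++ [(PySem.List.pyGet? (pvGetLS lin_tree l2) 0).getD 0] else c2)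
    else [(c1.length : Int), (c2.length : Int)]

def get_life_span (couple : List Int) (lin_tree : List (Int × List Int)) : List Int :=
  let c1 := [(PySem.List.pyGet? couple 0).getD 0]
  let c2 := [(PySem.List.pyGet? couple 1).getD 0]
  pvLoopA lin_tree (lin_tree.length + 1) c1 c2

-- ===== PORT B =====
-- one iteration of B's for-loop: span[cell] = 1 + span.get(children[0], 1) if len(children) == 1 else 1
-- (lin_tree[cell] is totalized with .getD []; the KeyError branch is unreachable, cell is a key)
def pvSpanStep (lin_tree : List (Int × List Int)) (span : PySem.Dict Int Int) (cell : Int) :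
    PySem.Dict Int Int :=
  span.insert cell
    (if (((PySem.Dict.mk lin_tree).get? cell).getD []).length = 1 then
       1 + span.getD ((PySem.List.pyGet? (((PySem.Dict.mk lin_tree).get? cell).getD []) 0).getD 0) 1
     else 1)

def get_life_span_alt (couple : List Int) (lin_tree : List (Int × List Int)) : List Int :=
  let span := (PySem.List.sorted (PySem.Dict.mk lin_tree).keys (fun x => x) true).foldl
      (pvSpanStep lin_tree) PySem.Dict.empty
  [span.getD ((PySem.List.pyGet? couple 0).getD 0) 1,
   span.getD ((PySem.List.pyGet? couple 1).getD 0) 1]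

-- ===== PRECONDITION & SPEC =====
-- Pre_ excludes couples of fewer than two cells (both Pythons raise IndexError), association
-- lists with duplicate keys (they do not represent a Python dict), and lin_trees in which some
-- single-child link does not point to a strictly larger cell id: without that ASTEC lineage
-- invariant (ids grow with time) A's while loop may never terminate and B's decreasing-id
-- processing order is unsound; this conservatively also excludes some terminating trees with
-- non-increasing links, on which A returns a chain length B's table does not reproduce.
def Pre_get_life_span (couple : List Int) (lin_tree : List (Int × List Int)) : Prop :=
  2 ≤ couple.length ∧ (lin_tree.map Prod.fst).Nodup ∧
    ∀ kv ∈ lin_tree, kv.2.length = 1 → kv.1 < kv.2.headI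
instance (couple : List Int) (lin_tree : List (Int × List Int)) : Decidable (Pre_get_life_span couple lin_tree) := by unfold Pre_get_life_span; infer_instance

def pvWitness_get_life_span : List Int × (List (Int × List Int)) :=
  ([1, 2], [(1, [3]), (3, [4, 5]), (2, [6])])

def Spec_get_life_span (couple : List Int) (lin_tree : List (Int × List Int)) (out : List Int) : Prop := out = get_life_span_alt couple lin_tree
instance (couple : List Int) (lin_tree : List (Int × List Int)) (out : List Int) : Decidable (Spec_get_life_span couple lin_tree out) := by unfold Spec_get_life_span; infer_instance

-- ===== CLAIM (what is proved, stated in full; the proofs are below) =====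
def Claim_equal_get_life_span : Prop := ∀ (couple : List Int) (lin_tree : List (Int × List Int)), Dom_get_life_span couple lin_tree → Pre_get_life_span couple lin_tree → Spec_get_life_span couple lin_tree (get_life_span couple lin_tree)

-- ===== LEMMAS AND PROOFS =====

-- proof-side view of one step of either program's chain advance
def pvStep (t : List (Int × List Int)) (c : Int) : Option Int :=
  if (pvGetLS t c).length = 1 then some ((PySem.List.pyGet? (pvGetLS t c) 0).getD 0) else none

-- termination measure: number of entries whose key is ≥ the current cell
def pvRank (t : List (Int × List Int)) (c : Int) : Nat :=
  (t.filter (fun kv => decide (c ≤ kv.1))).length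

-- fuel needed for the walk starting at c
def pvNeed (t : List (Int × List Int)) (c : Int) : Nat :=
  if pvStep t c = none then 0 else pvRank t c

-- reference chain length (what A's loop contributes per chain), with ample fuel
def pvCL (t : List (Int × List Int)) : Nat → Int → Int
  | 0, _ => 0
  | f + 1, c =>
    match pvStep t c with
    | some c' => 1 + pvCL t f c'
    | none => 0

-- the last element read by A's loop: c[-1] (with Python's IndexError defaulted, never hit here)
def pvLast (c : List Int) : Int := (PySem.List.pyGet? c (-1)).getD 0

theorem pvStep_mem {t : List (Int × List Int)} {c c' : Int}
    (h : pvStep t c = some c') : (c, [c']) ∈ t := by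
  unfold pvStep at h
  split at h
  · rename_i hlen
    obtain ⟨x, hx⟩ := List.length_eq_one_iff.mp hlen
    have hmem : (c, pvGetLS t c) ∈ t := by
      unfold pvGetLS at hx ⊢
      cases hg : (PySem.Dict.mk t).get? c with
      | none => rw [hg] at hx; simp at hx
      | some v =>
        have := PySem.Dict.mem_items_of_get?_eq_some (PySem.Dict.mk t) hg
        simpa [hg] using this
    rw [hx] at hmem h
    simp only [PySem.List.pyGet?_zero_cons, Option.getD_some, Option.some.injEq] at h
    exact h ▸ hmem
  · exact absurd h (by simp)

theorem pvStep_some_of_len {t : List (Int × List Int)} {c : Int}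
    (h : (pvGetLS t c).length = 1) :
    pvStep t c = some ((PySem.List.pyGet? (pvGetLS t c) 0).getD 0) := by
  simp [pvStep, h]

theorem pvStep_none_of_len {t : List (Int × List Int)} {c : Int}
    (h : ¬ (pvGetLS t c).length = 1) : pvStep t c = none := by
  simp [pvStep, h]

theorem pvRank_pos {t : List (Int × List Int)} {c c' : Int}
    (h : pvStep t c = some c') : 0 < pvRank t c := by
  have hm := pvStep_mem h
  unfold pvRank
  have : (c, [c']) ∈ t.filter (fun kv => decide (c ≤ kv.1)) :=
    List.mem_filter.mpr ⟨hm, by simp⟩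
  exact List.length_pos_of_mem this

theorem pvFilt_lt {c c' : Int} (hcc : c < c') :
    ∀ (t : List (Int × List Int)), (c, [c']) ∈ t →
      (t.filter (fun kv => decide (c' ≤ kv.1))).length <
        (t.filter (fun kv => decide (c ≤ kv.1))).length := by
  intro t
  induction t with
  | nil => intro h; simp at h
  | cons kv rest ih =>
    intro h
    rcases List.mem_cons.mp h with heq | hmem
    · have hmono : List.Sublist (rest.filter (fun kv => decide (c' ≤ kv.1)))
          (rest.filter (fun kv => decide (c ≤ kv.1))) :=
        List.monotone_filter_right rest (fun a ha => by
          simp only [decide_eq_true_eq] at ha ⊢; omega)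
      have hle := hmono.length_le
      rw [← heq, List.filter_cons_of_neg (by simp; omega),
        List.filter_cons_of_pos (by simp)]
      simp only [List.length_cons]
      omega
    · have h' := ih hmem
      by_cases h1 : c' ≤ kv.1 <;> by_cases h2 : c ≤ kv.1 <;>
        simp [h1, h2] <;> omega

theorem pvRank_step {t : List (Int × List Int)} {c c' : Int}
    (hP : ∀ kv ∈ t, kv.2.length = 1 → kv.1 < kv.2.headI)
    (h : pvStep t c = some c') : pvRank t c' < pvRank t c := by
  have hm := pvStep_mem h
  have hlt : c < c' := by simpa using hP (c, [c']) hm (by simp)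
  exact pvFilt_lt hlt t hm

theorem pvNeed_le_rank (t : List (Int × List Int)) (c : Int) : pvNeed t c ≤ pvRank t c := by
  unfold pvNeed; split <;> omega

theorem pvNeed_step {t : List (Int × List Int)} {c c' : Int}
    (hP : ∀ kv ∈ t, kv.2.length = 1 → kv.1 < kv.2.headI)
    (hs : pvStep t c = some c') {f : Nat} (hf : pvNeed t c ≤ f + 1) :
    pvNeed t c' ≤ f := by
  have h1 := pvRank_step hP hs
  have h2 := pvNeed_le_rank t c'
  unfold pvNeed at hf
  rw [hs] at hf
  simp at hf
  omega

theorem pvCL_none {t : List (Int × List Int)} {c : Int}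
    (h : pvStep t c = none) : ∀ f, pvCL t f c = 0 := by
  intro f
  cases f with
  | zero => rfl
  | succ f =>
    conv_lhs => rw [pvCL]
    rw [h]

theorem pvCL_succ {t : List (Int × List Int)} {c c' : Int}
    (hs : pvStep t c = some c') (f : Nat) : pvCL t (f + 1) c = 1 + pvCL t f c' := by
  conv_lhs => rw [pvCL]
  rw [hs]

-- pvCL is independent of the fuel once it covers pvNeed
theorem pvCL_fuel {t : List (Int × List Int)}
    (hP : ∀ kv ∈ t, kv.2.length = 1 → kv.1 < kv.2.headI) :
    ∀ (f : Nat) {c : Int} (g : Nat), pvNeed t c ≤ f → pvNeed t c ≤ g →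
      pvCL t f c = pvCL t g c := by
  intro f
  induction f with
  | zero =>
    intro c g hf _
    cases hs : pvStep t c with
    | none => rw [pvCL_none hs, pvCL_none hs]
    | some c' =>
      exfalso
      have := pvRank_pos hs
      unfold pvNeed at hf; rw [hs] at hf; simp at hf; omega
  | succ f ih =>
    intro c g hf hg
    cases hs : pvStep t c with
    | none => rw [pvCL_none hs, pvCL_none hs]
    | some c' =>
      have hpos := pvRank_pos hs
      have hgpos : 0 < g := by unfold pvNeed at hg; rw [hs] at hg; simp at hg; omega
      obtain ⟨g', rfl⟩ := Nat.exists_eq_add_of_lt hgpos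
      rw [Nat.zero_add] at *
      rw [pvCL_succ hs, pvCL_succ hs,
        ih g' (pvNeed_step hP hs hf) (pvNeed_step hP hs hg)]

theorem pvNeed_le_len (t : List (Int × List Int)) (c : Int) : pvNeed t c ≤ t.length := by
  have h1 := pvNeed_le_rank t c
  have h2 : pvRank t c ≤ t.length := List.length_filter_le _ _
  omega

-- the total chain length starting at c (1 + number of single-child steps)
def pvCl (t : List (Int × List Int)) (c : Int) : Int := 1 + pvCL t (t.length + 1) c

theorem pvCl_none {t : List (Int × List Int)} {c : Int}
    (h : pvStep t c = none) : pvCl t c = 1 := by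
  unfold pvCl; rw [pvCL_none h]; ring

theorem pvCl_succ {t : List (Int × List Int)}
    (hP : ∀ kv ∈ t, kv.2.length = 1 → kv.1 < kv.2.headI) {c c' : Int}
    (hs : pvStep t c = some c') : pvCl t c = 1 + pvCl t c' := by
  unfold pvCl
  rw [pvCL_succ hs]
  have : pvCL t t.length c' = pvCL t (t.length + 1) c' :=
    pvCL_fuel hP t.length (t.length + 1) (pvNeed_le_len t c') (by have := pvNeed_le_len t c'; omega)
  rw [this]

theorem pvCl_not_key {t : List (Int × List Int)} {c : Int}
    (h : c ∉ (PySem.Dict.mk t).keys) : pvCl t c = 1 := by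
  have hn : (PySem.Dict.mk t).get? c = none := by
    rw [PySem.Dict.get?_eq_none_iff_contains, PySem.Dict.contains_eq_decide_mem_keys]
    simpa using h
  apply pvCl_none
  apply pvStep_none_of_len
  simp [pvGetLS, hn]

-- ===== A-side: the interleaved loop computes the two chain lengths =====

theorem pvLast_append (c : List Int) (x : Int) : pvLast (c ++ [x]) = x := by
  simp [pvLast, PySem.List.pyGet?_neg_one_append_singleton]

theorem pvLast_singleton (a : Int) : pvLast [a] = a := by
  simp [pvLast, PySem.List.pyGet?_neg_one]

theorem pvLoopA_eq {t : List (Int × List Int)}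
    (hP : ∀ kv ∈ t, kv.2.length = 1 → kv.1 < kv.2.headI) :
    ∀ (f : Nat) (c1 c2 : List Int),
      pvNeed t (pvLast c1) ≤ f → pvNeed t (pvLast c2) ≤ f →
      pvLoopA t f c1 c2 =
        [(c1.length : Int) + pvCL t f (pvLast c1),
         (c2.length : Int) + pvCL t f (pvLast c2)] := by
  intro f
  induction f with
  | zero =>
    intro c1 c2 h1 h2
    simp [pvLoopA, pvCL]
  | succ f ih =>
    intro c1 c2 h1 h2
    rw [show pvLoopA t (f + 1) c1 c2 =
      (if (pvGetLS t (pvLast c1)).length = 1 ∨ (pvGetLS t (pvLast c2)).length = 1 then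
        pvLoopA t f
          (if (pvGetLS t (pvLast c1)).length = 1 then
             c1 ++ [(PySem.List.pyGet? (pvGetLS t (pvLast c1)) 0).getD 0] else c1)
          (if (pvGetLS t (pvLast c2)).length = 1 then
             c2 ++ [(PySem.List.pyGet? (pvGetLS t (pvLast c2)) 0).getD 0] else c2)
      else [(c1.length : Int), (c2.length : Int)]) from rfl]
    by_cases hA : (pvGetLS t (pvLast c1)).length = 1 <;>
      by_cases hB : (pvGetLS t (pvLast c2)).length = 1
    · have sA := pvStep_some_of_len hA
      have sB := pvStep_some_of_len hB
      rw [if_pos (Or.inl hA), if_pos hA, if_pos hB,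
        ih _ _ (by rw [pvLast_append]; exact pvNeed_step hP sA h1)
               (by rw [pvLast_append]; exact pvNeed_step hP sB h2),
        pvLast_append, pvLast_append]
      rw [pvCL_succ sA f, pvCL_succ sB f]
      simp; constructor <;> ring
    · have sA := pvStep_some_of_len hA
      have nB := pvStep_none_of_len hB
      rw [if_pos (Or.inl hA), if_pos hA, if_neg hB,
        ih _ _ (by rw [pvLast_append]; exact pvNeed_step hP sA h1)
               (by unfold pvNeed; rw [nB]; simp),
        pvLast_append]
      rw [pvCL_succ sA f, pvCL_none nB, pvCL_none nB]
      simp; ring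
    · have nA := pvStep_none_of_len hA
      have sB := pvStep_some_of_len hB
      rw [if_pos (Or.inr hB), if_neg hA, if_pos hB,
        ih _ _ (by unfold pvNeed; rw [nA]; simp)
               (by rw [pvLast_append]; exact pvNeed_step hP sB h2),
        pvLast_append]
      rw [pvCL_succ sB f, pvCL_none nA, pvCL_none nA]
      simp; ring
    · have nA := pvStep_none_of_len hA
      have nB := pvStep_none_of_len hB
      rw [if_neg (by tauto)]
      rw [pvCL_none nA, pvCL_none nB]
      simp

-- ===== B-side: the decreasing-id fold fills the table with the chain lengths =====

theorem pvFold_inv {t : List (Int × List Int)}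
    (hP : ∀ kv ∈ t, kv.2.length = 1 → kv.1 < kv.2.headI) :
    ∀ (ks : List Int) (span : PySem.Dict Int Int),
      ks.Pairwise (fun a b => b < a) →
      (∀ x, x ∉ ks → span.getD x 1 = pvCl t x) →
      ∀ x, (ks.foldl (pvSpanStep t) span).getD x 1 = pvCl t x := by
  intro ks
  induction ks with
  | nil => intro span _ hx x; exact hx x (by simp)
  | cons k rest ih =>
    intro span hpw hx x
    rw [List.foldl_cons]
    have hpw' := (List.pairwise_cons.mp hpw).2
    have hklt := (List.pairwise_cons.mp hpw).1
    apply ih _ hpw'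
    intro y hy
    by_cases hyk : y = k
    · subst hyk
      unfold pvSpanStep
      rw [PySem.Dict.getD_insert, if_pos rfl]
      by_cases hlen : (((PySem.Dict.mk t).get? y).getD []).length = 1
      · have hlen' : (pvGetLS t y).length = 1 := hlen
        have hs := pvStep_some_of_len hlen'
        set c := (PySem.List.pyGet? (pvGetLS t y) 0).getD 0 with hc
        have hyc : y < c := by
          have hm := pvStep_mem hs
          simpa using hP (y, [c]) hm (by simp)
        have hcnot : c ∉ y :: rest := by
          intro hmem
          rcases List.mem_cons.mp hmem with h | h
          · omega
          · have := hklt c h; omega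
        rw [if_pos hlen,
          show ((PySem.List.pyGet? (((PySem.Dict.mk t).get? y).getD []) 0).getD 0 : Int) = c from rfl,
          hx c hcnot]
        exact (pvCl_succ hP hs).symm
      · rw [if_neg hlen]
        exact (pvCl_none (pvStep_none_of_len hlen)).symm
    · unfold pvSpanStep
      rw [PySem.Dict.getD_insert, if_neg hyk]
      exact hx y (by simp [hyk, hy])

-- ===== VERDICT (by name: the statement is the Claim_ definition above) =====
theorem get_life_span_spec : Claim_equal_get_life_span := by
  intro couple t _hD hPre
  obtain ⟨-, hnd, hP⟩ := hPre
  unfold Spec_get_life_span get_life_span get_life_span_alt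
  dsimp only
  -- A side
  rw [pvLoopA_eq hP (t.length + 1) _ _
        (by rw [pvLast_singleton]; have := pvNeed_le_len t ((PySem.List.pyGet? couple 0).getD 0); omega)
        (by rw [pvLast_singleton]; have := pvNeed_le_len t ((PySem.List.pyGet? couple 1).getD 0); omega),
      pvLast_singleton, pvLast_singleton]
  -- B side
  have hkeys : (PySem.Dict.mk t).keys.Nodup := by
    simpa [PySem.Dict.keys_mk] using hnd
  set ks := PySem.List.sorted (PySem.Dict.mk t).keys (fun x => x) true with hks
  have hperm : ks.Perm (PySem.Dict.mk t).keys := PySem.List.sorted_perm _ _ _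
  have hndks : ks.Nodup := hperm.nodup_iff.mpr hkeys
  have hge : ks.Pairwise (fun a b => (fun x => x) b ≤ (fun x => x) a) :=
    PySem.List.sorted_pairwise_rev _ _
  have hpw : ks.Pairwise (fun a b => b < a) := by
    have := hndks.and hge
    exact this.imp (fun h => lt_of_le_of_ne h.2 (fun he => h.1 he.symm))
  have hfold := pvFold_inv hP ks PySem.Dict.empty hpw
    (fun x hxk => by
      have hxnot : x ∉ (PySem.Dict.mk t).keys := fun h => hxk (hperm.mem_iff.mpr h)
      rw [PySem.Dict.getD_empty, pvCl_not_key hxnot])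
  rw [hfold, hfold]
  simp [pvCl]
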